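-- pv_equiv track=rewrite | github.com/Pzqqt/MaoMiAV_Videos_Downloader | m3u8_downloader.py | set_jobs
-- ===== SOURCE A (Python) =====
-- def set_jobs(jobs):
--     if jobs <= 1:
--         return 1
--     if jobs >= 32:
--         return 32
--     jobs_list = [2**x for x in range(6)]
--     for x in range(5):
--         if jobs_list[x] <= jobs < jobs_list[x+1]:
--             return jobs_list[x]
--     return 8
-- ===== SOURCE B (Python) =====
-- def set_jobs(jobs):
--     if jobs <= 1:
--         return 1
--     if jobs >= 32:
--         return 32
--     return 2 ** (jobs.bit_length() - 1)
-- ===== Notes on version B (the rewrite author's own statement) =====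
-- stated objective: simpler
-- what changed: Replaced the power-of-two list construction and the interval scan with a closed form using the integer's bit length, keeping only the two clamp guards.
import Mathlib
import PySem

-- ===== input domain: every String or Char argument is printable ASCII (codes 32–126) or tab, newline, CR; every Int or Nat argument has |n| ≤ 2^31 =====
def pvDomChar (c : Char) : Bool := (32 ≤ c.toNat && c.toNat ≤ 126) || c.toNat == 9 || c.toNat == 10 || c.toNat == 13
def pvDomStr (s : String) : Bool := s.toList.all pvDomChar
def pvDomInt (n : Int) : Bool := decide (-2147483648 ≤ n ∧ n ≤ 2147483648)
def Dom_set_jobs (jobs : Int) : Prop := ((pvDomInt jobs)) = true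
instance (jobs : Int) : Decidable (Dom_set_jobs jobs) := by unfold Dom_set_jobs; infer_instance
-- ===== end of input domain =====

-- B replaces A's power-of-two list and interval scan with a closed form using the
-- integer's bit length, between the two clamp guards (objective: simpler).


-- ===== PORT A =====
-- the 'for x in range(5)' loop with early return; the index lookups are always
-- in range by construction (jobs_list has 6 elements), the 'none' branch falls
-- through to the loop's final 'return 8'
def set_jobs_scan (jobs : Int) (jobs_list : List Int) : List Int → Int
  | [] => 8
  | x :: rest =>
    match PySem.List.pyGet? jobs_list x, PySem.List.pyGet? jobs_list (x + 1) with
    | some a, some b => if a ≤ jobs ∧ jobs < b then a else set_jobs_scan jobs jobs_list rest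
    | _, _ => 8

def set_jobs (jobs : Int) : Int :=
  if jobs ≤ 1 then 1
  else if jobs ≥ 32 then 32
  else
    let jobs_list := (PySem.List.pyRange 0 6 1).map (fun x => (2 : Int) ^ x.toNat)
    set_jobs_scan jobs jobs_list (PySem.List.pyRange 0 5 1)

-- ===== PORT B =====
-- int.bit_length(): 0 for 0, else floor(log2 |n|) + 1
def pyBitLength (n : Int) : Int :=
  if n = 0 then 0 else (Nat.log2 n.natAbs : Int) + 1

def set_jobs_alt (jobs : Int) : Int :=
  if jobs ≤ 1 then 1
  else if jobs ≥ 32 then 32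
  else (2 : Int) ^ (pyBitLength jobs - 1).toNat

-- ===== PRECONDITION & SPEC =====
def Spec_set_jobs (jobs : Int) (out : Int) : Prop := out = set_jobs_alt jobs
instance (jobs : Int) (out : Int) : Decidable (Spec_set_jobs jobs out) := by unfold Spec_set_jobs; infer_instance

-- ===== CLAIM (what is proved, stated in full; the proofs are below) =====
def Claim_equal_set_jobs : Prop := ∀ (jobs : Int), Dom_set_jobs jobs → Spec_set_jobs jobs (set_jobs jobs)

-- ===== LEMMAS AND PROOFS =====
theorem set_jobs_eq_alt (jobs : Int) : set_jobs jobs = set_jobs_alt jobs := by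
  by_cases h1 : jobs ≤ 1
  · simp [set_jobs, set_jobs_alt, h1]
  · by_cases h2 : jobs ≥ 32
    · simp [set_jobs, set_jobs_alt, h1, h2]
    · have hlo : 2 ≤ jobs := by omega
      have hhi : jobs ≤ 31 := by omega
      interval_cases jobs <;> decide

-- ===== VERDICT (by name: the statement is the Claim_ definition above) =====
theorem set_jobs_spec : Claim_equal_set_jobs := by
  intro jobs _
  unfold Spec_set_jobs
  exact set_jobs_eq_alt jobs
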